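-- pv_equiv track=rewrite | github.com/rf-iasys/OEIS | OEIS_A034472.py | A034472
-- ===== SOURCE A (Python) =====
-- def A034472(n):
--     marked = []
--     current = 1
--     k = 2
--
--     while len(marked) < n:
--         marked.append(k)
--         k += current + k//2
--         current += k - 1
--
--     return marked
-- ===== SOURCE B (Python) =====
-- def A034472(n):
--     return [3**i + 1 for i in range(n)]
-- ===== Notes on version B (the rewrite author's own statement) =====
-- stated objective: simpler
-- what changed: Replaced the while loop that threads two auxiliary accumulators (current, k) through an additive recurrence by a one-line comprehension computing each term by the closed form 3**i + 1.
import Mathlib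
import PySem

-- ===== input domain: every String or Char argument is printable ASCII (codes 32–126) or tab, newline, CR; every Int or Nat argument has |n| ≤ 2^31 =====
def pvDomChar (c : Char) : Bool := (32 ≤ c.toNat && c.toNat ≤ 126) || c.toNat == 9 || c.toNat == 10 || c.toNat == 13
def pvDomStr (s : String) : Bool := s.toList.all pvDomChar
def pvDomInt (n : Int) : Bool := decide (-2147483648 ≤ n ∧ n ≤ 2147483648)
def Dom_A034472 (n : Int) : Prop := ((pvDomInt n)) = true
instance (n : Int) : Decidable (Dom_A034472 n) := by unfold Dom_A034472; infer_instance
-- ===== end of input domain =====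

-- B replaces A's while loop with two threaded accumulators by a direct closed-form
-- comprehension 3**i + 1; objective: simpler.

-- ===== PORT A =====
-- the while loop, state (marked, current, k); stops when len(marked) ≥ n
-- fuel = n.toNat bounds the iteration count (the loop adds one element per step and
-- stops as soon as len(marked) ≥ n); it only makes the same computation total
def A034472_loop (fuel : Nat) (n : Int) (marked : List Int) (current k : Int) : List Int :=
  match fuel with
  | 0 => marked
  | fuel + 1 =>
    if (marked.length : Int) < n then
      A034472_loop fuel n (marked ++ [k])
        (current + (k + (current + PySem.Int.floordiv k 2)) - 1)
        (k + (current + PySem.Int.floordiv k 2))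
    else marked

def A034472 (n : Int) : List Int := A034472_loop n.toNat n [] 1 2

-- ===== PORT B =====
def A034472_alt (n : Int) : List Int :=
  (PySem.List.pyRange 0 n 1).map (fun i => 3 ^ i.toNat + 1)

-- ===== PRECONDITION & SPEC =====
def Spec_A034472 (n : Int) (out : List Int) : Prop := out = A034472_alt n
instance (n : Int) (out : List Int) : Decidable (Spec_A034472 n out) := by unfold Spec_A034472; infer_instance

-- ===== CLAIM (what is proved, stated in full; the proofs are below) =====
def Claim_equal_A034472 : Prop := ∀ (n : Int), Dom_A034472 n → Spec_A034472 n (A034472 n)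

-- ===== LEMMAS AND PROOFS =====

-- loop invariant: at stage m, k = 3^m + 1 and 2*current = 3^(m+1) - 1
theorem A034472_loop_eq (fuel : Nat) : ∀ (n : Int) (marked : List Int) (current k : Int),
    n.toNat - marked.length ≤ fuel →
    k = 3 ^ marked.length + 1 →
    2 * current = 3 ^ (marked.length + 1) - 1 →
    A034472_loop fuel n marked current k =
      marked ++ (List.range (n.toNat - marked.length)).map
        (fun j => 3 ^ (marked.length + j) + 1) := by
  induction fuel with
  | zero =>
    intro n marked current k hd hk hc
    have h0 : n.toNat - marked.length = 0 := by omega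
    simp [A034472_loop, h0]
  | succ d ih =>
    intro n marked current k hd hk hc
    by_cases hlt : (marked.length : Int) < n
    case neg =>
      have h0 : n.toNat - marked.length = 0 := by omega
      simp [A034472_loop, hlt, h0]
    rw [A034472_loop, if_pos hlt]
    -- 3 ^ marked.length is odd
    obtain ⟨t, ht⟩ : Odd ((3:Int) ^ marked.length) := (by decide : Odd (3:Int)).pow
    have hfd : PySem.Int.floordiv k 2 = t + 1 := by
      have : k = 2 * (t + 1) := by omega
      rw [this, PySem.Int.floordiv_eq_ediv_of_pos (by norm_num)]
      omega
    have h1 : (3:Int) ^ (marked.length + 1) = 3 * 3 ^ marked.length := by ring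
    have h2 : (3:Int) ^ (marked.length + 1 + 1) = 9 * 3 ^ marked.length := by ring
    rw [ih n (marked ++ [k]) _ _ (by simp; omega)
      (by simp only [List.length_append, List.length_cons, List.length_nil]
          rw [hfd]; rw [h1]; omega)
      (by simp only [List.length_append, List.length_cons, List.length_nil]
          rw [hfd]; rw [h2]; omega)]
    have hn : n.toNat - marked.length = (n.toNat - (marked ++ [k]).length) + 1 := by
      simp; omega
    have htail : List.map ((fun j => (3:Int) ^ (marked.length + j) + 1) ∘ (· + 1))
        (List.range (n.toNat - (marked ++ [k]).length)) =
        List.map (fun j => (3:Int) ^ ((marked ++ [k]).length + j) + 1)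
        (List.range (n.toNat - (marked ++ [k]).length)) := by
      apply List.map_congr_left
      intro a _
      simp only [Function.comp_apply, List.length_append, List.length_cons, List.length_nil]
      congr 2
      omega
    rw [hn, List.range_succ_eq_map, List.map_cons, List.map_map, htail]
    have hhead : (3:Int) ^ (marked.length + 0) + 1 = k := by
      rw [hk]; ring
    rw [hhead]
    simp

-- ===== VERDICT (by name: the statement is the Claim_ definition above) =====
theorem A034472_spec : Claim_equal_A034472 := by
  intro n _
  unfold Spec_A034472 A034472 A034472_alt
  rw [A034472_loop_eq n.toNat n [] 1 2 (by simp) (by norm_num) (by norm_num)]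
  rw [PySem.List.pyRange_one]
  simp
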